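-- pv_equiv track=rewrite | github.com/Kvkthecreator/rightnow-agent-app-fullstack | enterprise/api/src/app/services/status_derivation.py | _categorize_work_by_status
-- ===== SOURCE A (Python) =====
-- from typing import Dict, Any, List, Optional, Tuple
--
-- def _categorize_work_by_status(work_items: List[Dict[str, Any]]) -> Dict[str, int]:
--     """Categorize work items by processing status."""
--     status_counts = {
--         'pending': 0,
--         'processing': 0,
--         'cascading': 0,
--         'completed': 0,
--         'failed': 0
--     }
--
--     for item in work_items:
--         status = item['processing_state']
--         if status in status_counts:
--             status_counts[status] += 1
--         elif status in ['claimed']: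
--             status_counts['processing'] += 1  # Group claimed with processing
--
--     return status_counts
-- ===== SOURCE B (Python) =====
-- def _categorize_work_by_status(work_items):
--     """Categorize work items by processing status: build a full frequency table
--     in one pass (no per-item branching), then assemble the fixed-shape result."""
--     tally = {}
--     for item in work_items:
--         s = item['processing_state']
--         tally[s] = tally.get(s, 0) + 1
--     return {
--         'pending': tally.get('pending', 0),
--         'processing': tally.get('processing', 0) + tally.get('claimed', 0),
--         'cascading': tally.get('cascading', 0),
--         'completed': tally.get('completed', 0),
--         'failed': tally.get('failed', 0),
--     }
-- ===== Notes on version B (the rewrite author's own statement) =====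
-- stated objective: alternative
-- what changed: Replaced the per-item if/elif branching into a fixed 5-key accumulator by an unconditioned frequency-table pass followed by a constant-shape assembly that folds 'claimed' into 'processing' at read time.
import Mathlib
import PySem

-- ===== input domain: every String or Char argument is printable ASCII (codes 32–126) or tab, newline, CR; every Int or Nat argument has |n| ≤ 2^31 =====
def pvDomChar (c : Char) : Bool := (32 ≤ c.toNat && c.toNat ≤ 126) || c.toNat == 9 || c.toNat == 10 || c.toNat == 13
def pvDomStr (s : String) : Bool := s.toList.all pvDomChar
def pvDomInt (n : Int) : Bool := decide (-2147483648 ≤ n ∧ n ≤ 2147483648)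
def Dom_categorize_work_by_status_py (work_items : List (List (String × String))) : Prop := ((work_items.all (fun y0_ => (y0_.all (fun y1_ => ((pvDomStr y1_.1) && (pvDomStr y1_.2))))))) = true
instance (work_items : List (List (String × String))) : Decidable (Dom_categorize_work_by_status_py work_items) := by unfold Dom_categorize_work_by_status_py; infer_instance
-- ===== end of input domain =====

-- B replaces A's per-item if/elif accumulation into a fixed 5-key dict by an
-- unconditioned frequency-table pass plus a constant-shape assembly (same cost).


-- ===== PORT A =====
-- shared primitive: item['processing_state'], first-match lookup (KeyError = none, excluded by Pre_)
def aStatusOf (item : List (String × String)) : Option String :=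
  (item.find? (fun p => p.1 == "processing_state")).map (·.2)

def aInitCounts : PySem.Dict String Int :=
  PySem.Dict.ofList [("pending", 0), ("processing", 0), ("cascading", 0), ("completed", 0), ("failed", 0)]

def aStep (d : PySem.Dict String Int) (item : List (String × String)) : PySem.Dict String Int :=
  let status := (aStatusOf item).getD ""          -- total stand-in; Pre_ guarantees the key is present
  if d.contains status then d.modify status 0 (· + 1)
  else if ["claimed"].contains status then d.modify "processing" 0 (· + 1)
  else d

def categorize_work_by_status_py (work_items : List (List (String × String))) : List (String × Int) :=
  (work_items.foldl aStep aInitCounts).items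

-- ===== PORT B =====
def categorize_work_by_status_py_alt (work_items : List (List (String × String))) : List (String × Int) :=
  let tally := work_items.foldl
    (fun d item => d.modify ((aStatusOf item).getD "") 0 (· + 1)) PySem.Dict.empty
  [("pending", tally.getD "pending" 0),
   ("processing", tally.getD "processing" 0 + tally.getD "claimed" 0),
   ("cascading", tally.getD "cascading" 0),
   ("completed", tally.getD "completed" 0),
   ("failed", tally.getD "failed" 0)]

-- ===== PRECONDITION & SPEC =====
-- Pre_ excludes only items missing the 'processing_state' key, on which both Pythons raise KeyError.
def Pre_categorize_work_by_status_py (work_items : List (List (String × String))) : Prop :=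
  (work_items.all (fun item => item.any (fun p => p.1 == "processing_state"))) = true
instance (work_items : List (List (String × String))) : Decidable (Pre_categorize_work_by_status_py work_items) := by unfold Pre_categorize_work_by_status_py; infer_instance

def pvWitness_categorize_work_by_status_py : (List (List (String × String))) :=
  [[("processing_state", "pending")], [("processing_state", "claimed")], [("processing_state", "odd")]]

def Spec_categorize_work_by_status_py (work_items : List (List (String × String))) (out : List (String × Int)) : Prop := out = categorize_work_by_status_py_alt work_items
instance (work_items : List (List (String × String))) (out : List (String × Int)) : Decidable (Spec_categorize_work_by_status_py work_items out) := by unfold Spec_categorize_work_by_status_py; infer_instance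

-- ===== CLAIM (what is proved, stated in full; the proofs are below) =====
def Claim_equal_categorize_work_by_status_py : Prop := ∀ (work_items : List (List (String × String))), Dom_categorize_work_by_status_py work_items → Pre_categorize_work_by_status_py work_items → Spec_categorize_work_by_status_py work_items (categorize_work_by_status_py work_items)

-- ===== LEMMAS AND PROOFS =====

-- A's loop state is always this 5-key literal dict
def mkD (a b c d e : Int) : PySem.Dict String Int :=
  PySem.Dict.mk [("pending", a), ("processing", b), ("cascading", c), ("completed", d), ("failed", e)]

def cnt1 (s k : String) : Int := if s = k then 1 else 0

lemma mkD_congr {a b c d e a' b' c' d' e' : Int} (h1 : a = a') (h2 : b = b')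
    (h3 : c = c') (h4 : d = d') (h5 : e = e') : mkD a b c d e = mkD a' b' c' d' e' := by
  subst h1 h2 h3 h4 h5; rfl

lemma step_mkD (s : String) (a b c d e : Int) :
    (if (mkD a b c d e).contains s then (mkD a b c d e).modify s 0 (· + 1)
     else if ["claimed"].contains s then (mkD a b c d e).modify "processing" 0 (· + 1)
     else mkD a b c d e) =
      mkD (a + cnt1 s "pending") (b + cnt1 s "processing" + cnt1 s "claimed")
          (c + cnt1 s "cascading") (d + cnt1 s "completed") (e + cnt1 s "failed") := by
  by_cases h1 : s = "pending"
  · subst h1; simp [mkD, cnt1, PySem.Dict.modify, PySem.Dict.insert, PySem.Dict.get?, PySem.Dict.getD]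
  by_cases h2 : s = "processing"
  · subst h2; simp [mkD, cnt1, PySem.Dict.modify, PySem.Dict.insert, PySem.Dict.get?, PySem.Dict.getD]
  by_cases h3 : s = "cascading"
  · subst h3; simp [mkD, cnt1, PySem.Dict.modify, PySem.Dict.insert, PySem.Dict.get?, PySem.Dict.getD]
  by_cases h4 : s = "completed"
  · subst h4; simp [mkD, cnt1, PySem.Dict.modify, PySem.Dict.insert, PySem.Dict.get?, PySem.Dict.getD]
  by_cases h5 : s = "failed"
  · subst h5; simp [mkD, cnt1, PySem.Dict.modify, PySem.Dict.insert, PySem.Dict.get?, PySem.Dict.getD]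
  by_cases h6 : s = "claimed"
  · subst h6; simp [mkD, cnt1, PySem.Dict.modify, PySem.Dict.insert, PySem.Dict.get?, PySem.Dict.getD]
  · simp [mkD, cnt1, h1, h2, h3, h4, h5, h6, Ne.symm h1, Ne.symm h2, Ne.symm h3, Ne.symm h4, Ne.symm h5]

lemma foldl_mkD (wi : List (List (String × String))) :
    ∀ (a b c d e : Int), wi.foldl aStep (mkD a b c d e) =
      mkD (a + ((wi.map (fun i => (aStatusOf i).getD "")).count "pending" : Int))
          (b + ((wi.map (fun i => (aStatusOf i).getD "")).count "processing" : Int)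
             + ((wi.map (fun i => (aStatusOf i).getD "")).count "claimed" : Int))
          (c + ((wi.map (fun i => (aStatusOf i).getD "")).count "cascading" : Int))
          (d + ((wi.map (fun i => (aStatusOf i).getD "")).count "completed" : Int))
          (e + ((wi.map (fun i => (aStatusOf i).getD "")).count "failed" : Int)) := by
  induction wi with
  | nil => intro a b c d e; simp
  | cons x t ih =>
    intro a b c d e
    have hstep : aStep (mkD a b c d e) x =
        mkD (a + cnt1 ((aStatusOf x).getD "") "pending")
            (b + cnt1 ((aStatusOf x).getD "") "processing" + cnt1 ((aStatusOf x).getD "") "claimed")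
            (c + cnt1 ((aStatusOf x).getD "") "cascading")
            (d + cnt1 ((aStatusOf x).getD "") "completed")
            (e + cnt1 ((aStatusOf x).getD "") "failed") := step_mkD _ a b c d e
    simp only [List.foldl_cons, hstep, ih, List.map_cons, List.count_cons]
    apply mkD_congr <;>
      (simp only [cnt1, beq_iff_eq]; split_ifs <;> push_cast <;> omega)

-- ===== VERDICT (by name: the statement is the Claim_ definition above) =====
theorem categorize_work_by_status_py_spec : Claim_equal_categorize_work_by_status_py := by
  intro wi _ _
  unfold Spec_categorize_work_by_status_py categorize_work_by_status_py categorize_work_by_status_py_alt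
  have hinit : aInitCounts = mkD 0 0 0 0 0 := by decide
  rw [hinit, foldl_mkD]
  have htally : ∀ k : String,
      (wi.foldl (fun d item => PySem.Dict.modify d ((aStatusOf item).getD "") 0 (· + 1))
        (PySem.Dict.empty)).getD k 0
      = ((wi.map (fun i => (aStatusOf i).getD "")).count k : Int) := by
    intro k
    have h := PySem.Dict.getD_foldl_modify_add_one
      (l := wi.map (fun i => (aStatusOf i).getD "")) (d := PySem.Dict.empty) (v := k)
    rw [List.foldl_map] at h
    simpa using h
  simp only [htally, mkD]
  norm_num
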